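-- pv_equiv track=rewrite | github.com/basvasilich/advent-of-code-2024 | day6/solution.py | scan_up
-- ===== SOURCE A (Python) =====
-- def scan_up(a_rows: dict[int, list[int]], a_cols: dict[int, list[int]], l_rows, l_cols, start: (int, int)) -> (int, int):
--     s_row, s_col = start
--     if s_col not in a_cols.keys():
--         return None
--
--     obstacles = a_cols[s_col]
--     for i in range(len(obstacles) - 1, -1, -1):
--         obstacle = obstacles[i]
--
--         if obstacle < s_row:
--             return obstacle + 1, s_col
--     return None
-- ===== SOURCE B (Python) =====
-- def scan_up(a_rows, a_cols, l_rows, l_cols, start):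
--     s_row, s_col = start
--     if s_col not in a_cols:
--         return None
--     best = None
--     for obstacle in a_cols[s_col]:
--         if obstacle < s_row:
--             best = obstacle
--     return None if best is None else (best + 1, s_col)
-- ===== Notes on version B (the rewrite author's own statement) =====
-- stated objective: alternative
-- what changed: A scans the obstacle list backwards by index with an early return; B makes one forward pass over the list values with a last-match accumulator and builds the result once at the end (no index arithmetic, no reverse range).
import Mathlib
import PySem

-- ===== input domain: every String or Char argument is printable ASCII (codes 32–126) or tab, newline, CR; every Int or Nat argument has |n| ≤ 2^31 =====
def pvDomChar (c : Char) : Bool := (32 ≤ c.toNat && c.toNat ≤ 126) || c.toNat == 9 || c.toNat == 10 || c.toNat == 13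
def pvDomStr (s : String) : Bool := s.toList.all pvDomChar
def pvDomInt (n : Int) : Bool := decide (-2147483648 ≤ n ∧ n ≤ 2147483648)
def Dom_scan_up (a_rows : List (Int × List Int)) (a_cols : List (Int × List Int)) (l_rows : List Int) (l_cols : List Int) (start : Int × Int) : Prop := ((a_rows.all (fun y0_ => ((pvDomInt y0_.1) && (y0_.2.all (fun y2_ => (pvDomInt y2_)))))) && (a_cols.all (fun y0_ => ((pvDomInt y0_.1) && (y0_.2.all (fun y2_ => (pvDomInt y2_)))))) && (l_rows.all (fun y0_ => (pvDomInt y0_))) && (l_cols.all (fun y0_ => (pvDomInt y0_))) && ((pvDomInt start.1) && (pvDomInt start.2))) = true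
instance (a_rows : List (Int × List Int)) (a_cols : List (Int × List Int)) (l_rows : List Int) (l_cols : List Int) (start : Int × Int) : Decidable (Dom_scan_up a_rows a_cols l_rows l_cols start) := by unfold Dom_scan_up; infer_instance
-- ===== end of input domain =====

-- B replaces A's backwards index loop with an early return by one forward pass
-- keeping the last obstacle below the start row; same result, no index arithmetic.

-- ===== PORT A =====
-- the 'for i in range(len(obstacles)-1, -1, -1)' loop with its early return
def scanUpLoopA (obstacles : List Int) (s_row s_col : Int) : List Int → Option (Int × Int)
  | [] => none
  | i :: rest =>
    match PySem.List.pyGet? obstacles i with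
    | none => none   -- unreachable: i is always in range
    | some obstacle =>
      if obstacle < s_row then some (obstacle + 1, s_col)
      else scanUpLoopA obstacles s_row s_col rest

def scan_up (a_rows : List (Int × List Int)) (a_cols : List (Int × List Int)) (l_rows : List Int) (l_cols : List Int) (start : Int × Int) : Option (Int × Int) :=
  let s_row := start.1
  let s_col := start.2
  match (PySem.Dict.mk a_cols).get? s_col with
  | none => none                -- s_col not in a_cols.keys()
  | some obstacles =>
      scanUpLoopA obstacles s_row s_col
        (PySem.List.pyRange ((obstacles.length : Int) - 1) (-1) (-1))

-- ===== PORT B =====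
def scan_up_alt (a_rows : List (Int × List Int)) (a_cols : List (Int × List Int)) (l_rows : List Int) (l_cols : List Int) (start : Int × Int) : Option (Int × Int) :=
  let s_row := start.1
  let s_col := start.2
  match (PySem.Dict.mk a_cols).get? s_col with
  | none => none
  | some obstacles =>
      match obstacles.foldl (fun best o => if o < s_row then some o else best) none with
      | none => none
      | some b => some (b + 1, s_col)

-- ===== PRECONDITION & SPEC =====
def Spec_scan_up (a_rows : List (Int × List Int)) (a_cols : List (Int × List Int)) (l_rows : List Int) (l_cols : List Int) (start : Int × Int) (out : Option (Int × Int)) : Prop := out = scan_up_alt a_rows a_cols l_rows l_cols start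
instance (a_rows : List (Int × List Int)) (a_cols : List (Int × List Int)) (l_rows : List Int) (l_cols : List Int) (start : Int × Int) (out : Option (Int × Int)) : Decidable (Spec_scan_up a_rows a_cols l_rows l_cols start out) := by unfold Spec_scan_up; infer_instance

-- ===== CLAIM (what is proved, stated in full; the proofs are below) =====
def Claim_equal_scan_up : Prop := ∀ (a_rows : List (Int × List Int)) (a_cols : List (Int × List Int)) (l_rows : List Int) (l_cols : List Int) (start : Int × Int), Dom_scan_up a_rows a_cols l_rows l_cols start → Spec_scan_up a_rows a_cols l_rows l_cols start (scan_up a_rows a_cols l_rows l_cols start)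

-- ===== LEMMAS AND PROOFS =====

-- the loop only looks at the indices, so equal reads give equal runs
theorem scanUpLoopA_congr (xs xs' : List Int) (s_row s_col : Int) (idxs : List Int)
    (h : ∀ i ∈ idxs, PySem.List.pyGet? xs i = PySem.List.pyGet? xs' i) :
    scanUpLoopA xs s_row s_col idxs = scanUpLoopA xs' s_row s_col idxs := by
  induction idxs with
  | nil => rfl
  | cons i rest ih =>
    simp only [scanUpLoopA, h i (List.mem_cons_self)]
    cases PySem.List.pyGet? xs' i with
    | none => rfl
    | some o =>
      by_cases ho : o < s_row <;>
        simp [ho, ih (fun j hj => h j (List.mem_cons_of_mem _ hj))]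

theorem scanUpLoopA_eq_foldl (obs : List Int) (s_row s_col : Int) :
    scanUpLoopA obs s_row s_col
        (PySem.List.pyRange ((obs.length : Int) - 1) (-1) (-1)) =
      match obs.foldl (fun best o => if o < s_row then some o else best) none with
      | none => none
      | some b => some (b + 1, s_col) := by
  induction obs using List.reverseRecOn with
  | nil =>
    rw [PySem.List.pyRange_neg_one_eq_nil (by norm_num)]
    rfl
  | append_singleton ys y ih =>
    have hlen : ((ys ++ [y]).length : Int) - 1 = (ys.length : Int) := by
      simp
    rw [hlen, PySem.List.pyRange_neg_one_cons (by omega)]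
    simp only [scanUpLoopA]
    have hget : PySem.List.pyGet? (ys ++ [y]) (ys.length : Int) = some y := by
      simpa using PySem.List.pyGet?_append_length (pre := ys) (y := y) (ys := [])
    rw [hget]
    have hrest : scanUpLoopA (ys ++ [y]) s_row s_col
        (PySem.List.pyRange ((ys.length : Int) - 1) (-1) (-1)) =
        scanUpLoopA ys s_row s_col
        (PySem.List.pyRange ((ys.length : Int) - 1) (-1) (-1)) := by
      apply scanUpLoopA_congr
      intro i hi
      rw [PySem.List.mem_pyRange_neg_one] at hi
      have h0 : 0 ≤ i := by omega
      have hlt : i.toNat < ys.length := by omega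
      rw [PySem.List.pyGet?_of_nonneg _ h0, PySem.List.pyGet?_of_nonneg _ h0,
        List.getElem?_append_left hlt]
    by_cases hy : y < s_row <;> simp [hy, hrest, ih]

-- ===== VERDICT (by name: the statement is the Claim_ definition above) =====
theorem scan_up_spec : Claim_equal_scan_up := by
  intro a_rows a_cols l_rows l_cols start _
  simp only [Spec_scan_up, scan_up, scan_up_alt]
  cases h : (PySem.Dict.mk a_cols).get? start.2 with
  | none => simp [h]
  | some obstacles => simp [h, scanUpLoopA_eq_foldl]
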